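-- pv_equiv track=rewrite | github.com/richardspicer/countersignal | src/countersignal/ipi/generators/markdown.py | _inject_html_comment
-- ===== SOURCE A (Python) =====
-- def _inject_html_comment(content: str, payload: str) -> str:
--     """Inject payload as HTML comment in markdown.
--
--     HTML comments are valid in markdown and are typically stripped
--     during rendering but may be processed by text extractors.
--
--     Args:
--         content: Base markdown content.
--         payload: Payload string to inject.
--
--     Returns:
--         Markdown with HTML comment containing payload.
--     """
--     comment = f"<!-- {payload} -->"
--     # Insert after first heading
--     lines = content.split("\n")
--     for i, line in enumerate(lines):
--         if line.startswith("# "):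
--             lines.insert(i + 1, comment)
--             break
--     return "\n".join(lines)
-- ===== SOURCE B (Python) =====
-- def _inject_html_comment(content: str, payload: str) -> str:
--     """Insert the comment after the first '# ' heading by direct substring
--     search and slice splicing (no split/join over all lines)."""
--     comment = f"<!-- {payload} -->"
--     if content.startswith("# "):
--         idx = 0
--     else:
--         pos = content.find("\n# ")
--         if pos == -1:
--             return content
--         idx = pos + 1
--     end = content.find("\n", idx)
--     if end == -1:
--         return content + "\n" + comment
--     return content[:end] + "\n" + comment + content[end:]
-- ===== Notes on version B (the rewrite author's own statement) =====
-- stated objective: alternative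
-- what changed: Replaces split-into-lines / scan-with-insert / rejoin by a direct substring search (startswith '# ' or find('\n# ')) for the first heading line and a single slice splice at its line end.
import Mathlib
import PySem

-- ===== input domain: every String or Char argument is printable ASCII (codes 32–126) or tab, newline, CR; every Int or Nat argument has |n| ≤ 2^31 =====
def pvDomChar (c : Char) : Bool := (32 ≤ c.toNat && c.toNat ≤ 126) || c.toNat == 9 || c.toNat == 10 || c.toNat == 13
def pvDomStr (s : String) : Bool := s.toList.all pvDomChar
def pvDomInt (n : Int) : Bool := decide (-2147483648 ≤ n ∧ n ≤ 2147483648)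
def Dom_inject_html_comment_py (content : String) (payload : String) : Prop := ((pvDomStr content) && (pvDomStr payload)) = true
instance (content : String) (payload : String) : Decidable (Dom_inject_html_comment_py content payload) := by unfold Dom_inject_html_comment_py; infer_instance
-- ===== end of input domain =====

-- B replaces A's split-into-lines / scan-with-insert / rejoin by a direct substring search for the
-- first heading line and a single slice splice at its line end (alternative decomposition, same cost).

-- ===== PORT A =====
-- comment = f"<!-- {payload} -->"
def pvComment (payload : String) : List Char :=
  "<!-- ".toList ++ payload.toList ++ " -->".toList

-- A's "for i, line in enumerate(lines): if line.startswith('# '): lines.insert(i+1, comment); break"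
def pvInsertLoop (comment : List Char) : List (List Char) → List (List Char)
  | [] => []
  | l :: ls =>
    if PySem.Chars.startswith l ['#', ' '] then l :: comment :: ls
    else l :: pvInsertLoop comment ls

def inject_html_comment_py (content : String) (payload : String) : String :=
  let comment := pvComment payload
  let lines := PySem.Chars.splitOn content.toList ['\n']
  String.ofList (PySem.Chars.join ['\n'] (pvInsertLoop comment lines))

-- ===== PORT B =====
-- "end = content.find('\n', idx); ..." — the tail of B once the insertion line index idx is known
def pvSplice (comment : List Char) (cs : List Char) (idx : Int) : List Char :=
  let e := PySem.Chars.findFrom cs ['\n'] idx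
  if e = -1 then cs ++ '\n' :: comment
  else PySem.List.slice cs none (some e) ++ '\n' :: comment ++ PySem.List.slice cs (some e) none

-- "if content.startswith('# '): idx = 0  else: pos = content.find('\n# '); return content if pos == -1 else ..."
def pvAltCore (comment : List Char) (cs : List Char) : List Char :=
  let idx? : Option Int :=
    if PySem.Chars.startswith cs ['#', ' '] then some 0
    else
      let pos := PySem.Chars.find cs ['\n', '#', ' ']
      if pos = -1 then none else some (pos + 1)
  match idx? with
  | none => cs
  | some idx => pvSplice comment cs idx

def inject_html_comment_py_alt (content : String) (payload : String) : String :=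
  String.ofList (pvAltCore (pvComment payload) content.toList)

-- ===== PRECONDITION & SPEC =====
def Spec_inject_html_comment_py (content : String) (payload : String) (out : String) : Prop := out = inject_html_comment_py_alt content payload
instance (content : String) (payload : String) (out : String) : Decidable (Spec_inject_html_comment_py content payload out) := by unfold Spec_inject_html_comment_py; infer_instance

-- ===== CLAIM (what is proved, stated in full; the proofs are below) =====
def Claim_equal_inject_html_comment_py : Prop := ∀ (content : String) (payload : String), Dom_inject_html_comment_py content payload → Spec_inject_html_comment_py content payload (inject_html_comment_py content payload)

-- ===== LEMMAS AND PROOFS =====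

lemma pv_splitOn_cons (c : Char) (cs : List Char) :
    List.splitOn '\n' (c :: cs) =
      if c = '\n' then [] :: List.splitOn '\n' cs
      else (List.splitOn '\n' cs).modifyHead (List.cons c) := by
  simp [List.splitOn, List.splitOnP_cons, beq_iff_eq]


lemma pv_splitOn_go (fuel : Nat) : ∀ (l cur : List Char) (acc : List (List Char)),
    l.length ≤ fuel →
    PySem.Chars.splitOn.go ['\n'] fuel l cur acc
      = acc.reverse ++ (List.splitOn '\n' l).modifyHead (cur.reverse ++ ·) := by
  induction fuel with
  | zero =>
    intro l cur acc h
    have : l = [] := List.length_eq_zero_iff.mp (Nat.le_zero.mp h)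
    subst this
    simp [PySem.Chars.splitOn.go, List.splitOn]
  | succ n ih =>
    intro l cur acc h
    match l with
    | [] => simp [PySem.Chars.splitOn.go, List.splitOn]
    | c :: rest =>
      rw [PySem.Chars.splitOn.go]
      by_cases hc : c = '\n'
      · subst hc
        have hp : List.isPrefixOf ['\n'] ('\n' :: rest) = true := by
          simp [List.isPrefixOf]
        rw [if_pos hp]
        rw [ih _ _ _ (by simpa using Nat.lt_succ_iff.mp (by simpa using h))]
        rw [pv_splitOn_cons]
        have hid : ∀ (L : List (List Char)), List.modifyHead (fun x : List Char => x) L = L := by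
          intro L; cases L <;> simp
        simp [hid]
      · have hp : List.isPrefixOf ['\n'] (c :: rest) = true → False := by
          simp [List.isPrefixOf]
          exact fun h => absurd h.symm hc
        rw [if_neg (by simpa using hp)]
        rw [ih _ _ _ (by simpa using Nat.lt_succ_iff.mp (by simpa using h))]
        rw [pv_splitOn_cons, if_neg hc]
        rcases hsp : List.splitOn '\n' rest with _ | ⟨hd, tl⟩
        · exact absurd hsp (List.splitOnP_ne_nil _ _)
        · simp


lemma pv_splitOn_eq (cs : List Char) :
    PySem.Chars.splitOn cs ['\n'] = List.splitOn '\n' cs := by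
  show PySem.Chars.splitOn.go _ _ _ _ _ = _
  rw [pv_splitOn_go _ _ _ _ (by omega)]
  have hid : ∀ (L : List (List Char)), List.modifyHead (fun x : List Char => x) L = L := by
    intro L; cases L <;> simp
  simpa using hid (List.splitOn '\n' cs)


lemma pv_splitOn_no_nl (cs : List Char) :
    ∀ l ∈ List.splitOn '\n' cs, '\n' ∉ l := by
  induction cs with
  | nil => simp [List.splitOn]
  | cons c rest ih =>
    rw [pv_splitOn_cons]
    by_cases hc : c = '\n'
    · simp only [if_pos hc]
      intro l hl
      rcases List.mem_cons.mp hl with hl | hl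
      · simp [hl]
      · exact ih l hl
    · simp only [if_neg hc]
      rcases hsp : List.splitOn '\n' rest with _ | ⟨hd, tl⟩
      · exact absurd hsp (List.splitOnP_ne_nil _ _)
      · have hhd : '\n' ∉ hd := ih hd (by rw [hsp]; exact List.mem_cons_self)
        intro l hl
        simp only [List.modifyHead] at hl
        rcases List.mem_cons.mp hl with hl | hl
        · subst hl
          intro hmem
          rcases List.mem_cons.mp hmem with h | h
          · exact hc h.symm
          · exact hhd h
        · exact ih l (by rw [hsp]; exact List.mem_cons_of_mem _ hl)


lemma pv_intercalate_cons₂ (a b : List Char) (l : List (List Char)) :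
    (['\n'] : List Char).intercalate (a :: b :: l) = a ++ '\n' :: (['\n'] : List Char).intercalate (b :: l) := by
  simp [List.intercalate, List.intersperse]


lemma pv_find_eq (s sub : List Char) (k : Nat)
    (h1 : sub <+: s.drop k) (h2 : ∀ i < k, ¬ sub <+: s.drop i) :
    PySem.Chars.find s sub = (k : Int) := by
  have hinf : sub <:+: s := (h1.isInfix).trans (List.drop_suffix k s).isInfix
  have h0 : 0 ≤ PySem.Chars.find s sub := (PySem.Chars.find_nonneg_iff s sub).mpr hinf
  obtain ⟨hp, hmin⟩ := PySem.Chars.find_spec h0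
  have : (PySem.Chars.find s sub).toNat = k := by
    rcases Nat.lt_trichotomy (PySem.Chars.find s sub).toNat k with h | h | h
    · exact absurd hp (h2 _ h)
    · exact h
    · exact absurd h1 (hmin _ h)
  omega


lemma pv_find_none (s sub : List Char) (h : ∀ i : Nat, ¬ sub <+: s.drop i) :
    PySem.Chars.find s sub = -1 := by
  rw [PySem.Chars.find_eq_neg_one_iff]
  intro hinf
  obtain ⟨j, hj⟩ := (PySem.Chars.exists_prefix_drop_iff_isIn sub s).mpr
    ((PySem.Chars.isIn_iff_infix _ _).mpr hinf)
  exact h j hj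


lemma pv_no_occ (l rest pat : List Char) (hl : '\n' ∉ l) (j : Nat) (hj : j < l.length) :
    ¬ ('\n' :: pat) <+: (l ++ rest).drop j := by
  rw [List.drop_append_of_le_length (le_of_lt hj), List.drop_eq_getElem_cons hj]
  intro hpre
  rw [List.cons_append, List.cons_prefix_cons] at hpre
  exact hl (hpre.1 ▸ List.getElem_mem hj)


lemma pv_find_append (l rest pat : List Char) (hl : '\n' ∉ l) :
    PySem.Chars.find (l ++ rest) ('\n' :: pat)
      = if PySem.Chars.find rest ('\n' :: pat) = -1 then -1
        else (l.length : Int) + PySem.Chars.find rest ('\n' :: pat) := by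
  by_cases hr : PySem.Chars.find rest ('\n' :: pat) = -1
  · rw [if_pos hr]
    apply pv_find_none
    intro i
    by_cases hi : i < l.length
    · exact pv_no_occ l rest pat hl i hi
    · intro hpre
      have : (l ++ rest).drop i = rest.drop (i - l.length) := by
        have := List.drop_length_add_append (l₁ := l) (l₂ := rest) (i - l.length)
        rwa [Nat.add_sub_cancel' (Nat.le_of_not_lt hi)] at this
      rw [this] at hpre
      rw [PySem.Chars.find_eq_neg_one_iff] at hr
      exact hr (hpre.isInfix.trans (List.drop_suffix _ _).isInfix)
  · rw [if_neg hr]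
    have h0 : 0 ≤ PySem.Chars.find rest ('\n' :: pat) := by
      have := PySem.Chars.neg_one_le_find rest ('\n' :: pat)
      omega
    obtain ⟨hp, hmin⟩ := PySem.Chars.find_spec h0
    set p := (PySem.Chars.find rest ('\n' :: pat)).toNat with hpdef
    have : PySem.Chars.find (l ++ rest) ('\n' :: pat) = ((l.length + p : Nat) : Int) := by
      apply pv_find_eq
      · rw [List.drop_length_add_append]
        exact hp
      · intro i hi
        by_cases hil : i < l.length
        · exact pv_no_occ l rest pat hl i hil
        · intro hpre
          have heq : (l ++ rest).drop i = rest.drop (i - l.length) := by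
            have := List.drop_length_add_append (l₁ := l) (l₂ := rest) (i - l.length)
            rwa [Nat.add_sub_cancel' (Nat.le_of_not_lt hil)] at this
          rw [heq] at hpre
          exact hmin _ (by omega) hpre
    rw [this]
    push_cast
    omega


lemma pv_find_cons_nl (cs' pat : List Char) :
    PySem.Chars.find ('\n' :: cs') ('\n' :: pat)
      = if pat <+: cs' then 0
        else if PySem.Chars.find cs' ('\n' :: pat) = -1 then -1
        else 1 + PySem.Chars.find cs' ('\n' :: pat) := by
  by_cases hp : pat <+: cs'
  · rw [if_pos hp]
    have := pv_find_eq ('\n' :: cs') ('\n' :: pat) 0 (by simpa [List.cons_prefix_cons] using hp) (by omega)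
    simpa using this
  · rw [if_neg hp]
    have hshift : ∀ i : Nat, ('\n' :: cs').drop (1 + i) = cs'.drop i := by
      intro i; rw [Nat.add_comm]; rfl
    by_cases hr : PySem.Chars.find cs' ('\n' :: pat) = -1
    · rw [if_pos hr]
      apply pv_find_none
      intro i
      match i with
      | 0 =>
        simp only [List.drop_zero, List.cons_prefix_cons]
        exact fun h => hp h.2
      | Nat.succ j =>
        intro hpre
        rw [PySem.Chars.find_eq_neg_one_iff] at hr
        have : ('\n' :: cs').drop (j + 1) = cs'.drop j := rfl
        rw [this] at hpre
        exact hr (hpre.isInfix.trans (List.drop_suffix _ _).isInfix)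
    · rw [if_neg hr]
      have h0 : 0 ≤ PySem.Chars.find cs' ('\n' :: pat) := by
        have := PySem.Chars.neg_one_le_find cs' ('\n' :: pat)
        omega
      obtain ⟨hpf, hmin⟩ := PySem.Chars.find_spec h0
      have : PySem.Chars.find ('\n' :: cs') ('\n' :: pat)
          = ((1 + (PySem.Chars.find cs' ('\n' :: pat)).toNat : Nat) : Int) := by
        apply pv_find_eq
        · rw [hshift]; exact hpf
        · intro i hi
          match i with
          | 0 =>
            simp only [List.drop_zero, List.cons_prefix_cons]
            exact fun h => hp h.2
          | Nat.succ j =>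
            intro hpre
            have hj : ('\n' :: cs').drop (j + 1) = cs'.drop j := rfl
            rw [hj] at hpre
            exact hmin _ (by omega) hpre
      rw [this]
      push_cast
      omega


lemma pv_sw_append_true (l rest : List Char)
    (h : PySem.Chars.startswith l ['#', ' '] = true) :
    PySem.Chars.startswith (l ++ rest) ['#', ' '] = true := by
  rw [PySem.Chars.startswith_iff] at h ⊢
  exact h.trans (l.prefix_append rest)


lemma pv_sw_append_false (l cs' : List Char) (hl : '\n' ∉ l)
    (h : PySem.Chars.startswith l ['#', ' '] = false) :
    PySem.Chars.startswith (l ++ '\n' :: cs') ['#', ' '] = false := by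
  simp only [Bool.eq_false_iff, ne_eq, PySem.Chars.startswith_iff] at h ⊢
  intro hpre
  match l, h, hpre with
  | [], h, hpre =>
    rw [List.nil_append, List.cons_prefix_cons] at hpre
    exact absurd hpre.1 (by decide)
  | [c], h, hpre =>
    rw [List.cons_append, List.nil_append, List.cons_prefix_cons, List.cons_prefix_cons] at hpre
    exact absurd hpre.2.1 (by decide)
  | a :: b :: t, h, hpre =>
    apply h
    rw [List.cons_append, List.cons_append, List.cons_prefix_cons, List.cons_prefix_cons] at hpre
    rw [List.cons_prefix_cons, List.cons_prefix_cons]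
    exact ⟨hpre.1, hpre.2.1, List.nil_prefix⟩


lemma pv_find_no_nl (l pat : List Char) (hl : '\n' ∉ l) :
    PySem.Chars.find l ('\n' :: pat) = -1 := by
  rw [PySem.Chars.find_eq_neg_one_iff]
  intro h
  exact hl (h.subset List.mem_cons_self)


lemma pv_loop_ne_nil (comment : List Char) (l : List Char) (ls : List (List Char)) :
    pvInsertLoop comment (l :: ls) ≠ [] := by
  unfold pvInsertLoop
  split <;> simp

-- B's end-of-line search and splice commute with prepending a '\n'-free line plus its separator

lemma pv_splice_shift (comment l cs' : List Char) (k' : Nat) (hk : k' ≤ cs'.length) :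
    pvSplice comment (l ++ '\n' :: cs') ((l.length + 1 + k' : Nat) : Int)
      = l ++ '\n' :: pvSplice comment cs' ((k' : Nat) : Int) := by
  unfold pvSplice
  have hlen : (l ++ '\n' :: cs').length = l.length + 1 + cs'.length := by simp; omega
  have hdrop : (l ++ '\n' :: cs').drop (l.length + 1 + k') = cs'.drop k' := by
    have h1 : l.length + 1 + k' = l.length + (k' + 1) := by omega
    rw [h1, List.drop_length_add_append]
    rfl
  rw [PySem.Chars.findFrom_natCast _ _ _ (by omega), hdrop,
    PySem.Chars.findFrom_natCast _ _ _ hk]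
  by_cases hq : PySem.Chars.find (cs'.drop k') ['\n'] = -1
  · simp only [hq, reduceIte]
    simp
  · rw [if_neg hq, if_neg hq]
    have h0 : 0 ≤ PySem.Chars.find (cs'.drop k') ['\n'] := by
      have := PySem.Chars.neg_one_le_find (cs'.drop k') ['\n']
      omega
    set q := (PySem.Chars.find (cs'.drop k') ['\n']).toNat with hqdef
    have hqq : PySem.Chars.find (cs'.drop k') ['\n'] = (q : Int) := by omega
    rw [hqq]
    rw [if_neg (by omega), if_neg (by omega)]
    have he1 : ((l.length + 1 + k' : Nat) : Int) + (q : Int) = ((l.length + 1 + (k' + q) : Nat) : Int) := by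
      push_cast; omega
    have he2 : ((k' : Nat) : Int) + (q : Int) = ((k' + q : Nat) : Int) := rfl
    rw [he1, he2]
    rw [PySem.List.slice_to _ (by positivity), PySem.List.slice_from _ (by positivity),
      PySem.List.slice_to _ (by positivity), PySem.List.slice_from _ (by positivity)]
    simp only [Int.toNat_natCast]
    have h1 : l.length + 1 + (k' + q) = l.length + (k' + q + 1) := by omega
    rw [h1]
    rw [List.take_length_add_append, List.drop_length_add_append]
    have ht : ('\n' :: cs').take (k' + q + 1) = '\n' :: cs'.take (k' + q) := rfl
    have hd : ('\n' :: cs').drop (k' + q + 1) = cs'.drop (k' + q) := rfl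
    rw [ht, hd]
    simp


lemma pv_core_join (comment : List Char) :
    ∀ ls : List (List Char), (∀ l ∈ ls, '\n' ∉ l) →
      pvAltCore comment ((['\n'] : List Char).intercalate ls)
        = (['\n'] : List Char).intercalate (pvInsertLoop comment ls) := by
  intro ls
  induction ls with
  | nil =>
    intro _
    simp [pvAltCore, pvInsertLoop, List.intercalate, PySem.Chars.startswith,
      PySem.Chars.find, PySem.Chars.find.go]
  | cons l ls ih =>
    intro hfree
    have hl : '\n' ∉ l := hfree l List.mem_cons_self
    have hfree' : ∀ x ∈ ls, '\n' ∉ x := fun x hx => hfree x (List.mem_cons_of_mem _ hx)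
    cases ls with
    | nil =>
      have hintc : (['\n'] : List Char).intercalate [l] = l := by
        simp [List.intercalate]
      rw [hintc]
      by_cases hsw : PySem.Chars.startswith l ['#', ' '] = true
      · have hstep : pvInsertLoop comment [l] = [l, comment] := by
          simp [pvInsertLoop, hsw]
        rw [hstep]
        simp only [pvAltCore, hsw, if_true]
        show pvSplice comment l 0 = _
        unfold pvSplice
        rw [PySem.Chars.findFrom_zero, pv_find_no_nl l [] hl, if_pos rfl,
          pv_intercalate_cons₂]
        simp [List.intercalate]
      · rw [Bool.not_eq_true] at hsw
        have hstep : pvInsertLoop comment [l] = [l] := by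
          simp [pvInsertLoop, hsw]
        rw [hstep, hintc]
        simp only [pvAltCore, hsw, Bool.false_eq_true, if_false,
          pv_find_no_nl l ['#', ' '] hl, reduceIte]
    | cons l2 ls2 =>
      rw [pv_intercalate_cons₂]
      set cs' := (['\n'] : List Char).intercalate (l2 :: ls2) with hcs'
      have hIH := ih hfree'
      obtain ⟨x, xs, hloop⟩ := List.exists_cons_of_ne_nil (pv_loop_ne_nil comment l2 ls2)
      by_cases hsw : PySem.Chars.startswith l ['#', ' '] = true
      · -- the heading is the first line
        have hstep : pvInsertLoop comment (l :: l2 :: ls2) = l :: comment :: l2 :: ls2 := by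
          simp [pvInsertLoop, hsw]
        have hswc := pv_sw_append_true l ('\n' :: cs') hsw
        have hfind0 : PySem.Chars.find ('\n' :: cs') ['\n'] = 0 := by
          rw [pv_find_cons_nl cs' [], if_pos List.nil_prefix]
        have hfind : PySem.Chars.find (l ++ '\n' :: cs') ['\n'] = ((l.length : Nat) : Int) := by
          rw [pv_find_append l ('\n' :: cs') [] hl, hfind0]
          simp
        rw [hstep, pv_intercalate_cons₂, pv_intercalate_cons₂, ← hcs']
        simp only [pvAltCore, hswc, if_true]
        show pvSplice comment (l ++ '\n' :: cs') 0 = _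
        unfold pvSplice
        rw [PySem.Chars.findFrom_zero, hfind, if_neg (by omega),
          PySem.List.slice_to _ (by positivity), PySem.List.slice_from _ (by positivity)]
        simp only [Int.toNat_natCast, List.take_left, List.drop_left]
        simp
      · rw [Bool.not_eq_true] at hsw
        have hstep : pvInsertLoop comment (l :: l2 :: ls2)
            = l :: pvInsertLoop comment (l2 :: ls2) := by
          simp [pvInsertLoop, hsw]
        have hswc := pv_sw_append_false l cs' hl hsw
        have hfa := pv_find_append l ('\n' :: cs') ['#', ' '] hl
        have hfc := pv_find_cons_nl cs' ['#', ' ']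
        rw [hstep, hloop, pv_intercalate_cons₂, ← hloop, ← hIH]
        by_cases hsw' : ['#', ' '] <+: cs'
        · -- the heading is the first line of the tail
          have hswcs' : PySem.Chars.startswith cs' ['#', ' '] = true :=
            (PySem.Chars.startswith_iff _ _).mpr hsw'
          rw [if_pos hsw'] at hfc
          rw [hfc, if_neg (by omega)] at hfa
          have hAlt : pvAltCore comment cs' = pvSplice comment cs' ((0 : Nat) : Int) := by
            simp only [pvAltCore, hswcs', if_true]
            rfl
          rw [hAlt]
          simp only [pvAltCore, hswc, Bool.false_eq_true, if_false, hfa]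
          rw [if_neg (by omega)]
          show pvSplice comment (l ++ '\n' :: cs') (↑l.length + 0 + 1) = _
          have hidx : ((l.length : Nat) : Int) + 0 + 1 = ((l.length + 1 + 0 : Nat) : Int) := by
            push_cast; omega
          rw [hidx, pv_splice_shift comment l cs' 0 (by omega)]
        · have hswcs' : PySem.Chars.startswith cs' ['#', ' '] = false := by
            rw [Bool.eq_false_iff, ne_eq, PySem.Chars.startswith_iff]
            exact hsw'
          rw [if_neg hsw'] at hfc
          by_cases hfind' : PySem.Chars.find cs' ['\n', '#', ' '] = -1
          · -- no heading anywhere: both sides are the identity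
            rw [if_pos hfind'] at hfc
            rw [hfc, if_pos rfl] at hfa
            have hAlt : pvAltCore comment cs' = cs' := by
              simp only [pvAltCore, hswcs', Bool.false_eq_true, if_false, hfind', reduceIte]
            rw [hAlt]
            simp only [pvAltCore, hswc, Bool.false_eq_true, if_false, hfa, reduceIte]
          · -- the heading is strictly inside the tail
            have h0p : 0 ≤ PySem.Chars.find cs' ['\n', '#', ' '] := by
              have := PySem.Chars.neg_one_le_find cs' ['\n', '#', ' ']
              omega
            set p := (PySem.Chars.find cs' ['\n', '#', ' ']).toNat with hpdef
            have hplt : p < cs'.length := by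
              obtain ⟨hpre, -⟩ := PySem.Chars.find_spec h0p
              by_contra hge
              rw [List.drop_eq_nil_of_le (by omega)] at hpre
              simp at hpre
            have hpq : PySem.Chars.find cs' ['\n', '#', ' '] = ((p : Nat) : Int) := by omega
            rw [if_neg hfind'] at hfc
            rw [hfc, if_neg (by omega)] at hfa
            have hAlt : pvAltCore comment cs' = pvSplice comment cs' ((p + 1 : Nat) : Int) := by
              simp only [pvAltCore, hswcs', Bool.false_eq_true, if_false, hpq,
                if_neg (show ¬ ((p : Nat) : Int) = -1 by omega)]
              show pvSplice comment cs' (((p : Nat) : Int) + 1) = _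
              norm_cast
            rw [hAlt]
            simp only [pvAltCore, hswc, Bool.false_eq_true, if_false, hfa, hpq]
            rw [if_neg (by omega)]
            show pvSplice comment (l ++ '\n' :: cs') (↑l.length + (1 + ((p : Nat) : Int)) + 1) = _
            have hidx : ((l.length : Nat) : Int) + (1 + ((p : Nat) : Int)) + 1
                = ((l.length + 1 + (p + 1) : Nat) : Int) := by
              push_cast; omega
            rw [hidx, pv_splice_shift comment l cs' (p + 1) (by omega)]

-- ===== VERDICT (by name: the statement is the Claim_ definition above) =====
theorem inject_html_comment_py_spec : Claim_equal_inject_html_comment_py := by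
  intro content payload _
  unfold Spec_inject_html_comment_py
  unfold inject_html_comment_py inject_html_comment_py_alt
  rw [pv_splitOn_eq]
  show String.ofList (PySem.Chars.join ['\n']
      (pvInsertLoop (pvComment payload) (List.splitOn '\n' content.toList))) = _
  have hjoin : ∀ ls, PySem.Chars.join ['\n'] ls = (['\n'] : List Char).intercalate ls :=
    fun _ => rfl
  rw [hjoin, ← pv_core_join _ _ (pv_splitOn_no_nl content.toList),
    List.intercalate_splitOn]
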